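-- pv_equiv track=rewrite | github.com/FilipHalon/text_historical_authenticity_evaluation | text_file_processing.py | create_bigrams_and_trigrams
-- ===== SOURCE A (Python) =====
-- def create_bigrams_and_trigrams(normalized_unigram_list):
--     bigram_list = []
--     trigram_list = []
--     for idx, unigram in enumerate(normalized_unigram_list):
--         if idx < len(normalized_unigram_list)-1:
--             next_unigram = normalized_unigram_list[idx+1]
--             bigram_list.append(' '.join([unigram,
--                                          next_unigram]))
--             if idx < len(normalized_unigram_list)-2:
--                 scnd_next_unigram = normalized_unigram_list[idx+2]
--                 trigram_list.append(' '.join([unigram,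
--                                               next_unigram,
--                                               scnd_next_unigram]))
--
--     return bigram_list, trigram_list
-- ===== SOURCE B (Python) =====
-- def create_bigrams_and_trigrams(normalized_unigram_list):
--     bigram_list = []
--     trigram_list = []
--     prev_token = None
--     prev_bigram = None
--     for token in normalized_unigram_list:
--         if prev_bigram is not None:
--             trigram_list.append(' '.join([prev_bigram, token]))
--         if prev_token is not None:
--             prev_bigram = ' '.join([prev_token, token])
--             bigram_list.append(prev_bigram)
--         prev_token = token
--     return bigram_list, trigram_list
-- ===== Notes on version B (the rewrite author's own statement) =====
-- stated objective: alternative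
-- what changed: Replaces A's random-access lookahead loop (indexing toks[idx+1], toks[idx+2] with len-based guards) by a streaming one-pass fold with constant lookbehind memory: each trigram is derived by extending the previously emitted bigram, so no index arithmetic or element lookup occurs.
import Mathlib
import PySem

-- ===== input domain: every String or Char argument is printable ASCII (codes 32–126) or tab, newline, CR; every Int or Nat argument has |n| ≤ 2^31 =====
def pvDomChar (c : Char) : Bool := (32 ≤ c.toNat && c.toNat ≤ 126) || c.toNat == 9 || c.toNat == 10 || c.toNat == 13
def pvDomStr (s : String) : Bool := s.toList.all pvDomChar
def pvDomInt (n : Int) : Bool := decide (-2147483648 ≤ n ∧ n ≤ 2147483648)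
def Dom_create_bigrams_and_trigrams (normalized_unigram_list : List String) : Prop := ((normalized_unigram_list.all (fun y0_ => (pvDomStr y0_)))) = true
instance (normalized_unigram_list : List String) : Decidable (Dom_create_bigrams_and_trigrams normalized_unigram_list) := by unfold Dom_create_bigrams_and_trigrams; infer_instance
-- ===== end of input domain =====

-- B replaces A's random-access lookahead loop (toks[idx+1]/toks[idx+2] with len-based guards)
-- by a streaming one-pass fold with constant lookbehind memory, each trigram extending the
-- previously emitted bigram (alternative decomposition, same cost).


-- ===== PORT A =====
-- the loop body, one step per (idx, unigram) pair of enumerate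
def pvStepA (full : List String) (st : List String × List String) (p : Int × String) :
    List String × List String :=
  if p.1 < (full.length : Int) - 1 then
    match PySem.List.pyGet? full (p.1 + 1) with
    | none => st    -- unreachable: the guard keeps idx+1 in range
    | some next_unigram =>
      let bigram_list := st.1 ++ [PySem.Str.join " " [p.2, next_unigram]]
      if p.1 < (full.length : Int) - 2 then
        match PySem.List.pyGet? full (p.1 + 2) with
        | none => (bigram_list, st.2)    -- unreachable: the guard keeps idx+2 in range
        | some scnd_next_unigram =>
          (bigram_list, st.2 ++ [PySem.Str.join " " [p.2, next_unigram, scnd_next_unigram]])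
      else (bigram_list, st.2)
  else st

def create_bigrams_and_trigrams (normalized_unigram_list : List String) :
    List String × List String :=
  (PySem.List.enumerate normalized_unigram_list 0).foldl
    (pvStepA normalized_unigram_list) ([], [])

-- ===== PORT B =====
-- loop body: state = (bigram_list, trigram_list, prev_token, prev_bigram)
def pvStepB (st : List String × List String × Option String × Option String) (token : String) :
    List String × List String × Option String × Option String :=
  let trigram_list :=
    match st.2.2.2 with
    | some prev_bigram => st.2.1 ++ [PySem.Str.join " " [prev_bigram, token]]
    | none => st.2.1
  match st.2.2.1 with
  | some prev_token =>
    let prev_bigram := PySem.Str.join " " [prev_token, token]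
    (st.1 ++ [prev_bigram], trigram_list, some token, some prev_bigram)
  | none => (st.1, trigram_list, some token, st.2.2.2)

def create_bigrams_and_trigrams_alt (normalized_unigram_list : List String) :
    List String × List String :=
  let st := normalized_unigram_list.foldl pvStepB ([], [], none, none)
  (st.1, st.2.1)

-- ===== PRECONDITION & SPEC =====
def Spec_create_bigrams_and_trigrams (normalized_unigram_list : List String) (out : List String × List String) : Prop := out = create_bigrams_and_trigrams_alt normalized_unigram_list
instance (normalized_unigram_list : List String) (out : List String × List String) : Decidable (Spec_create_bigrams_and_trigrams normalized_unigram_list out) := by unfold Spec_create_bigrams_and_trigrams; infer_instance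

-- ===== CLAIM (what is proved, stated in full; the proofs are below) =====
def Claim_equal_create_bigrams_and_trigrams : Prop := ∀ (normalized_unigram_list : List String), Dom_create_bigrams_and_trigrams normalized_unigram_list → Spec_create_bigrams_and_trigrams normalized_unigram_list (create_bigrams_and_trigrams normalized_unigram_list)

-- ===== LEMMAS AND PROOFS =====

-- the two n-gram lists of a suffix, as structural functions (shared characterisation)
def pvBi : List String → List String
  | a :: b :: rest => PySem.Str.join " " [a, b] :: pvBi (b :: rest)
  | _ => []
def pvTri : List String → List String
  | a :: b :: c :: rest => PySem.Str.join " " [a, b, c] :: pvTri (b :: c :: rest)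
  | _ => []

lemma pvJoin3 (a b c : String) :
    PySem.Str.join " " [PySem.Str.join " " [a, b], c] = PySem.Str.join " " [a, b, c] := by
  simp [PySem.Str.join, PySem.Chars.join_cons_cons, PySem.Chars.join_singleton]

-- A's loop, at any start index k, appends the suffix's bigram/trigram lists
lemma pvLoopA (full : List String) :
    ∀ (xs : List String) (k : Nat) (acc : List String × List String),
      xs = full.drop k →
      (PySem.List.enumerate xs (k : Int)).foldl (pvStepA full) acc =
        (acc.1 ++ pvBi xs, acc.2 ++ pvTri xs) := by
  intro xs
  induction xs with
  | nil => intro k acc _; simp [PySem.List.enumerate, pvBi, pvTri]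
  | cons x xs' ih =>
    intro k acc hdrop
    have hlen : full.length = k + (x :: xs').length := by
      have h1 := congrArg List.length hdrop
      rw [List.length_drop] at h1
      simp only [List.length_cons] at h1 ⊢
      omega
    have hget1 : ∀ j : Nat, full[k + j]? = (x :: xs')[j]? := by
      intro j
      rw [hdrop, List.getElem?_drop]
    have hdrop' : xs' = full.drop (k + 1) := by
      have h : full.drop (k + 1) = (full.drop k).tail := by rw [List.tail_drop]
      rw [h, ← hdrop]; rfl
    rw [PySem.List.enumerate_cons, List.foldl_cons]
    rcases xs' with _ | ⟨y, ys⟩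
    · -- last element: the outer guard fails, nothing is appended
      have hc : ¬ ((k : Int) < (full.length : Int) - 1) := by
        have hlen' : full.length = k + 1 := by simpa using hlen
        omega
      simp [pvStepA, hc, PySem.List.enumerate, pvBi, pvTri]
    · have hc : ((k : Int) < (full.length : Int) - 1) := by
        simp only [List.length_cons] at hlen; omega
      have h1 : PySem.List.pyGet? full ((k : Int) + 1) = some y := by
        have hk : ((k : Int) + 1) = ((k + 1 : Nat) : Int) := by push_cast; ring
        rw [hk, PySem.List.pyGet?_natCast, hget1 1]; rfl
      rcases ys with _ | ⟨z, zs⟩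
      · -- second-to-last element: bigram only
        have hc2 : ¬ ((k : Int) < (full.length : Int) - 2) := by
          have hlen' : full.length = k + 2 := by simpa using hlen
          omega
        have := ih (k + 1) (acc.1 ++ [PySem.Str.join " " [x, y]], acc.2) hdrop'
        push_cast at this
        have hstep : pvStepA full acc ((k : Int), x) =
            (acc.1 ++ [PySem.Str.join " " [x, y]], acc.2) := by
          simp [pvStepA, hc, h1, hc2]
        rw [hstep, this]
        simp [pvBi, pvTri]
      · -- bigram and trigram both appended
        have hc2 : ((k : Int) < (full.length : Int) - 2) := by
          have hlen' : k + 3 ≤ full.length := by simp at hlen; omega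
          omega
        have h2 : PySem.List.pyGet? full ((k : Int) + 2) = some z := by
          have hk : ((k : Int) + 2) = ((k + 2 : Nat) : Int) := by push_cast; ring
          rw [hk, PySem.List.pyGet?_natCast, hget1 2]; rfl
        have := ih (k + 1)
          (acc.1 ++ [PySem.Str.join " " [x, y]], acc.2 ++ [PySem.Str.join " " [x, y, z]]) hdrop'
        push_cast at this
        have hstep : pvStepA full acc ((k : Int), x) =
            (acc.1 ++ [PySem.Str.join " " [x, y]], acc.2 ++ [PySem.Str.join " " [x, y, z]]) := by
          simp [pvStepA, hc, h1, hc2, h2]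
        rw [hstep, this]
        simp [pvBi, pvTri]

-- B's fold from a warm state (a previous token p and a previous bigram pb)
lemma pvLoopB :
    ∀ (xs : List String) (p pb : String) (B T : List String),
      ∃ q r,
        xs.foldl pvStepB (B, T, some p, some pb) =
          (B ++ pvBi (p :: xs),
           T ++ (match xs with | [] => [] | x :: _ => [PySem.Str.join " " [pb, x]])
             ++ pvTri (p :: xs), q, r) := by
  intro xs
  induction xs with
  | nil => intro p pb B T; exact ⟨some p, some pb, by simp [pvBi, pvTri]⟩
  | cons x xs' ih =>
    intro p pb B T
    obtain ⟨q, r, hih⟩ := ih x (PySem.Str.join " " [p, x])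
      (B ++ [PySem.Str.join " " [p, x]]) (T ++ [PySem.Str.join " " [pb, x]])
    refine ⟨q, r, ?_⟩
    rw [List.foldl_cons]
    have hstep : pvStepB (B, T, some p, some pb) x =
        (B ++ [PySem.Str.join " " [p, x]], T ++ [PySem.Str.join " " [pb, x]],
         some x, some (PySem.Str.join " " [p, x])) := by
      simp [pvStepB]
    rw [hstep, hih]
    rcases xs' with _ | ⟨y, ys⟩
    · simp [pvBi, pvTri]
    · simp [pvBi, pvTri, pvJoin3]

-- ===== VERDICT (by name: the statement is the Claim_ definition above) =====
theorem create_bigrams_and_trigrams_spec : Claim_equal_create_bigrams_and_trigrams := by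
  intro xs _
  unfold Spec_create_bigrams_and_trigrams create_bigrams_and_trigrams create_bigrams_and_trigrams_alt
  have hA := pvLoopA xs xs 0 ([], []) (by simp)
  simp only [Nat.cast_zero] at hA
  rw [hA]
  rcases xs with _ | ⟨x, xs'⟩
  · simp [pvBi, pvTri]
  rcases xs' with _ | ⟨y, ys⟩
  · simp [pvStepB, pvBi, pvTri]
  -- two cold-start steps, then the warm-state lemma
  have hstep1 : pvStepB ([], [], none, none) x = ([], [], some x, none) := by
    simp [pvStepB]
  have hstep2 : pvStepB ([], [], some x, none) y =
      ([PySem.Str.join " " [x, y]], [], some y, some (PySem.Str.join " " [x, y])) := by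
    simp [pvStepB]
  obtain ⟨q, r, hB⟩ := pvLoopB ys y (PySem.Str.join " " [x, y]) [PySem.Str.join " " [x, y]] []
  simp only [List.foldl_cons, hstep1, hstep2, hB]
  rcases ys with _ | ⟨z, zs⟩
  · simp [pvBi, pvTri]
  · simp [pvBi, pvTri, pvJoin3]
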